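-- pv_equiv track=rewrite | github.com/paiml/depyler | examples/hard_control_flow.py | error_code_pipeline
-- ===== SOURCE A (Python) =====
-- def error_code_pipeline(values: list[int]) -> list[int]:
--     """Multi-stage processing pipeline using error codes instead of exceptions.
--
--     Stage 1: Validate (return -1 on invalid)
--     Stage 2: Transform (return -2 on overflow)
--     Stage 3: Aggregate (return -3 on underflow)
--
--     Tests multiple return paths with different error codes,
--     simulating exception handling via return values.
--     """
--     # Stage 1: Validate all values
--     for v in values:
--         if v < -1000 or v > 1000:
--             return [-1]
--
--     # Stage 2: Transform (square each value, check for overflow)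
--     transformed: list[int] = []
--     for v in values:
--         squared: int = v * v
--         if squared > 500000:
--             return [-2]
--         transformed.append(squared)
--
--     # Stage 3: Running sum with underflow check
--     running: list[int] = []
--     total: int = 0
--     for t in transformed:
--         total += t
--         if total < 0:
--             return [-3]
--         running.append(total)
--
--     return running
-- ===== SOURCE B (Python) =====
-- def error_code_pipeline(values: list[int]) -> list[int]:
--     """Validate, then one fused pass: square, overflow-check, running sum.
--
--     No intermediate `transformed` list; the underflow check of the original
--     is dropped because squares are non-negative, so the total never goes
--     below zero.
--     """
--     if not all(-1000 <= v <= 1000 for v in values):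
--         return [-1]
--     running: list[int] = []
--     total: int = 0
--     for v in values:
--         squared = v * v
--         if squared > 500000:
--             return [-2]
--         total += squared
--         running.append(total)
--     return running
-- ===== Notes on version B (the rewrite author's own statement) =====
-- stated objective: simpler
-- what changed: Validation becomes a single all() predicate; stages 2 and 3 are fused into one pass that squares, checks overflow and accumulates the running sum directly, dropping the intermediate transformed list and the unreachable underflow branch (squares are non-negative).
import Mathlib
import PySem

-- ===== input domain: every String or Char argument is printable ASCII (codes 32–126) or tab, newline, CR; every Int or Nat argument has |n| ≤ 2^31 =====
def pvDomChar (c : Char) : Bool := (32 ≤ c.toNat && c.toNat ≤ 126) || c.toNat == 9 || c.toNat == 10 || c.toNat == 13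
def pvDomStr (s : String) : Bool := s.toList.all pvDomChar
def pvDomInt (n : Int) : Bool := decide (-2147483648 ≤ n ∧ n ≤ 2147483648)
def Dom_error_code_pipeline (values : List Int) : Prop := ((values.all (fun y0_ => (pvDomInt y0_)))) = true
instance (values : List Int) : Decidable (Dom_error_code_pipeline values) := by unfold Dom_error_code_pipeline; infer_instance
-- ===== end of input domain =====

-- B fuses A's transform and aggregate loops into one pass and drops the unreachable underflow branch; objective: simpler.

-- ===== PORT A =====
-- Stage 1 loop: returns true iff some value is out of range (early return [-1])
def ecpA_invalid : List Int → Bool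
  | [] => false
  | v :: rest => if v < -1000 ∨ v > 1000 then true else ecpA_invalid rest

-- Stage 2 loop: builds `transformed`; none = early return [-2]
def ecpA_transform : List Int → List Int → Option (List Int)
  | [], transformed => some transformed
  | v :: rest, transformed =>
      let squared : Int := v * v
      if squared > 500000 then none else ecpA_transform rest (transformed ++ [squared])

-- Stage 3 loop: running sums; none = early return [-3]
def ecpA_aggregate : List Int → Int → List Int → Option (List Int)
  | [], _, running => some running
  | t :: rest, total, running =>
      let total' := total + t
      if total' < 0 then none else ecpA_aggregate rest total' (running ++ [total'])

def error_code_pipeline (values : List Int) : List Int :=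
  if ecpA_invalid values then [-1]
  else
    match ecpA_transform values [] with
    | none => [-2]
    | some transformed =>
        match ecpA_aggregate transformed 0 [] with
        | none => [-3]
        | some running => running

-- ===== PORT B =====
-- single fused pass: square, overflow check, running total; none = return [-2]
def ecpB_loop : List Int → Int → List Int → Option (List Int)
  | [], _, running => some running
  | v :: rest, total, running =>
      let squared := v * v
      if squared > 500000 then none
      else ecpB_loop rest (total + squared) (running ++ [total + squared])

def error_code_pipeline_alt (values : List Int) : List Int :=
  if !(values.all (fun v => -1000 ≤ v ∧ v ≤ 1000)) then [-1]
  else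
    match ecpB_loop values 0 [] with
    | none => [-2]
    | some running => running

-- ===== PRECONDITION & SPEC =====
def Spec_error_code_pipeline (values : List Int) (out : List Int) : Prop := out = error_code_pipeline_alt values
instance (values : List Int) (out : List Int) : Decidable (Spec_error_code_pipeline values out) := by unfold Spec_error_code_pipeline; infer_instance

-- ===== CLAIM (what is proved, stated in full; the proofs are below) =====
def Claim_equal_error_code_pipeline : Prop := ∀ (values : List Int), Dom_error_code_pipeline values → Spec_error_code_pipeline values (error_code_pipeline values)

-- ===== LEMMAS AND PROOFS =====

theorem ecpA_invalid_eq (values : List Int) :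
    ecpA_invalid values = !(values.all (fun v => -1000 ≤ v ∧ v ≤ 1000)) := by
  induction values with
  | nil => simp [ecpA_invalid]
  | cons v rest ih =>
      simp only [ecpA_invalid, List.all_cons, ih]
      by_cases h : v < -1000 ∨ v > 1000
      · have hn : ¬ (-1000 ≤ v ∧ v ≤ 1000) := by omega
        simp [h, hn]
      · have hy : (-1000 ≤ v ∧ v ≤ 1000) := by omega
        simp [h, hy]

theorem ecpA_transform_acc (values acc : List Int) :
    ecpA_transform values acc = (ecpA_transform values []).map (acc ++ ·) := by
  induction values generalizing acc with
  | nil => simp [ecpA_transform]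
  | cons v rest ih =>
      simp only [ecpA_transform]
      by_cases h : (v * v : Int) > 500000
      · simp [h]
      · simp only [h, if_false, List.nil_append]
        rw [ih (acc ++ [v * v]), ih [v * v]]
        cases ecpA_transform rest [] <;> simp

theorem ecpB_loop_some_of_transform (values : List Int) (t : List Int)
    (h : ecpA_transform values [] = some t) :
    ∀ (total : Int) (running : List Int), ∃ r, ecpB_loop values total running = some r := by
  induction values generalizing t with
  | nil => intro total running; exact ⟨running, rfl⟩
  | cons v rest ih =>
      intro total running
      simp only [ecpA_transform] at h
      by_cases hsq : (v * v : Int) > 500000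
      · simp [hsq] at h
      · simp only [hsq, if_false, List.nil_append] at h
        rw [ecpA_transform_acc rest [v * v]] at h
        cases hrest : ecpA_transform rest [] with
        | none => rw [hrest] at h; simp at h
        | some t' =>
            simp only [ecpB_loop, hsq, if_false]
            exact ih t' hrest (total + v * v) (running ++ [total + v * v])

theorem ecp_fuse (values : List Int) (total : Int) (running : List Int) (htot : 0 ≤ total) :
    (match ecpA_transform values [] with
     | none => none
     | some t => ecpA_aggregate t total running) = ecpB_loop values total running := by
  induction values generalizing total running with
  | nil => simp [ecpA_transform, ecpA_aggregate, ecpB_loop]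
  | cons v rest ih =>
      simp only [ecpA_transform, ecpB_loop]
      by_cases h : (v * v : Int) > 500000
      · simp [h]
      · simp only [h, if_false, List.nil_append]
        rw [ecpA_transform_acc rest [v * v]]
        have hsq : (0 : Int) ≤ v * v := mul_self_nonneg v
        have hlt : ¬ (total + v * v < 0) := by omega
        cases hrest : ecpA_transform rest [] with
        | none =>
            have := ih (total + v * v) (running ++ [total + v * v]) (by omega)
            rw [hrest] at this
            simpa using this
        | some t =>
            have := ih (total + v * v) (running ++ [total + v * v]) (by omega)
            rw [hrest] at this
            simpa [ecpA_aggregate, hlt] using this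

-- ===== VERDICT (by name: the statement is the Claim_ definition above) =====
theorem error_code_pipeline_spec : Claim_equal_error_code_pipeline := by
  intro values _
  unfold Spec_error_code_pipeline error_code_pipeline error_code_pipeline_alt
  rw [ecpA_invalid_eq]
  cases hv : (values.all (fun v => decide (-1000 ≤ v ∧ v ≤ 1000))) with
  | false => simp
  | true =>
      simp only [Bool.not_true, Bool.false_eq_true, if_false]
      have hf := ecp_fuse values 0 [] le_rfl
      cases ht : ecpA_transform values [] with
      | none =>
          rw [ht] at hf
          simp only [] at hf
          simp [← hf]
      | some t =>
          rw [ht] at hf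
          obtain ⟨r, hr⟩ := ecpB_loop_some_of_transform values t ht 0 []
          rw [hr] at hf
          simp only [] at hf
          simp [hf, hr]
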